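-- pv_equiv track=rewrite | github.com/OYcedar/SExtractor | src/common.py | findFirstUTF8
-- ===== SOURCE A (Python) =====
-- def findFirstUTF8(data, pos):
--     length = 0
--     #查询长度
--     if (data[pos] & 0x80) == 0x00:
--         length = 1
--     elif (data[pos] & 0xE0) == 0xC0:
--         length = 2
--     elif (data[pos] & 0xF0) == 0xE0:
--         length = 3
--     elif(data[pos] & 0xF8) == 0xF0:
--         length = 4
--     else:
--         return -1
--     #检查后续字节是否合法
--     for i in range(1, length):
--         if (data[pos+i] & 0xC0) != 0x80:
--             return -1
--     return length
-- ===== SOURCE B (Python) =====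
-- # Table-driven + recursive: a 256-entry length table built once replaces the
-- # bitmask chain, and the continuation bytes are validated by a recursive helper
-- # using floor-division classification instead of a for loop with masks.
-- _UTF8_LEN = [1] * 128 + [-1] * 64 + [2] * 32 + [3] * 16 + [4] * 8 + [-1] * 8
--
--
-- def _utf8Tail(data, j, remaining, length):
--     if remaining == 0:
--         return length
--     if data[j] % 256 // 64 != 2:
--         return -1
--     return _utf8Tail(data, j + 1, remaining - 1, length)
--
--
-- def findFirstUTF8(data, pos):
--     length = _UTF8_LEN[data[pos] % 256]
--     if length < 0:
--         return -1
--     return _utf8Tail(data, pos + 1, length - 1, length)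
-- ===== Notes on version B (the rewrite author's own statement) =====
-- stated objective: alternative
-- what changed: B replaces A's chain of bitmask comparisons by a single lookup in a precomputed 256-entry length table indexed by the lead byte mod 256, and replaces A's for-loop over range(1,length) by a recursive helper that walks the continuation bytes classifying each by floor division (byte%256//64 == 2) instead of masking.
import Mathlib
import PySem

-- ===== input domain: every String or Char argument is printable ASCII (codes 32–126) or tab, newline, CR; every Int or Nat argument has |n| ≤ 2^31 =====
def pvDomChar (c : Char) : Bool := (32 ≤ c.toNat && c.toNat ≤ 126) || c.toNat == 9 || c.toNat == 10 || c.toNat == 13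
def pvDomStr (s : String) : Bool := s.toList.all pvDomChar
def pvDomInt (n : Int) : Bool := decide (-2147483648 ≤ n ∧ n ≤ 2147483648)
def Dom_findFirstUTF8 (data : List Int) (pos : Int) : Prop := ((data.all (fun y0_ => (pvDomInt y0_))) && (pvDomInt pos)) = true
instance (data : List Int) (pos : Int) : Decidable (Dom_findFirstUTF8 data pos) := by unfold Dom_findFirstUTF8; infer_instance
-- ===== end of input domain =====

-- B replaces A's bitmask chain by a precomputed 256-entry length table and A's
-- for-loop over continuation bytes by a recursive helper classifying each byte
-- by floor division (alternative decomposition, same cost).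


-- ===== PORT A =====
-- A's 'for i in range(1, length)' loop: early return -1 on a bad continuation byte.
def pvContA (data : List Int) (pos : Int) (length : Int) : List Int → Int
  | [] => length
  | i :: rest =>
    match PySem.List.pyGet? data (pos + i) with
    | none => 0  -- IndexError in Python; excluded by Pre_
    | some bi => if PySem.Int.band bi 0xC0 ≠ 0x80 then -1 else pvContA data pos length rest

def findFirstUTF8 (data : List Int) (pos : Int) : Int :=
  match PySem.List.pyGet? data pos with
  | none => 0  -- IndexError in Python; excluded by Pre_
  | some b =>
    let length : Int :=
      if PySem.Int.band b 0x80 = 0 then 1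
      else if PySem.Int.band b 0xE0 = 0xC0 then 2
      else if PySem.Int.band b 0xF0 = 0xE0 then 3
      else if PySem.Int.band b 0xF8 = 0xF0 then 4
      else 0  -- sentinel for the final 'else: return -1'
    if length = 0 then -1
    else pvContA data pos length (PySem.List.pyRange 1 length 1)

-- ===== PORT B =====
-- Source B's module-level table _UTF8_LEN = [1]*128 + [-1]*64 + [2]*32 + [3]*16 + [4]*8 + [-1]*8
def pvUtf8Table : List Int :=
  List.replicate 128 1 ++ List.replicate 64 (-1) ++ List.replicate 32 2 ++
  List.replicate 16 3 ++ List.replicate 8 4 ++ List.replicate 8 (-1)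

-- Source B's recursive helper _utf8Tail; the Python int 'remaining' counts down to 0,
-- so it is ported as the Nat it is at every reachable call (length - 1 ≥ 0).
def pvUtf8Tail (data : List Int) (j : Int) (remaining : Nat) (length : Int) : Int :=
  match remaining with
  | 0 => length
  | r + 1 =>
    match PySem.List.pyGet? data j with
    | none => 0  -- IndexError in Python; excluded by Pre_
    | some b =>
      if PySem.Int.floordiv (PySem.Int.mod b 256) 64 ≠ 2 then -1
      else pvUtf8Tail data (j + 1) r length

def findFirstUTF8_alt (data : List Int) (pos : Int) : Int :=
  match PySem.List.pyGet? data pos with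
  | none => 0  -- IndexError in Python; excluded by Pre_
  | some x =>
    match PySem.List.pyGet? pvUtf8Table (PySem.Int.mod x 256) with
    | none => 0  -- unreachable: 0 ≤ x % 256 < 256 = table size
    | some length =>
      if length < 0 then -1
      else pvUtf8Tail data (pos + 1) (length - 1).toNat length

-- ===== PRECONDITION & SPEC =====
-- Expected sequence length from the lead byte value c = data[pos] mod 256 (0 = A returns -1 at once).
def pvLenOf (c : Nat) : Int :=
  if c < 0x80 then 1 else if c < 0xC0 then 0
  else if c < 0xE0 then 2 else if c < 0xF0 then 3 else if c < 0xF8 then 4 else 0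

def pvIsContByte (y : Int) : Bool :=
  decide (0x80 ≤ PySem.Int.mod y 256 ∧ PySem.Int.mod y 256 < 0xC0)

-- Python A raises IndexError exactly when one of the (at most four) reads it actually performs is
-- out of range; A stops reading at the first non-continuation byte, so later indices need not exist.
def pvReadsOk (data : List Int) (pos : Int) : Bool :=
  match PySem.List.pyGet? data pos with
  | none => false
  | some b =>
    let L := pvLenOf (PySem.Int.mod b 256).toNat
    if L < 2 then true else
    match PySem.List.pyGet? data (pos + 1) with
    | none => false
    | some b1 =>
      if ¬ pvIsContByte b1 then true else
      if L < 3 then true else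
      match PySem.List.pyGet? data (pos + 2) with
      | none => false
      | some b2 =>
        if ¬ pvIsContByte b2 then true else
        if L < 4 then true else (PySem.List.pyGet? data (pos + 3)).isSome

-- Pre_ = "every list access A performs is in range" (A raises IndexError otherwise).
def Pre_findFirstUTF8 (data : List Int) (pos : Int) : Prop := pvReadsOk data pos = true
instance (data : List Int) (pos : Int) : Decidable (Pre_findFirstUTF8 data pos) := by
  unfold Pre_findFirstUTF8; infer_instance

def pvWitness_findFirstUTF8 : List Int × Int := ([65], 0)

def Spec_findFirstUTF8 (data : List Int) (pos : Int) (out : Int) : Prop := out = findFirstUTF8_alt data pos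
instance (data : List Int) (pos : Int) (out : Int) : Decidable (Spec_findFirstUTF8 data pos out) := by unfold Spec_findFirstUTF8; infer_instance

-- ===== CLAIM (what is proved, stated in full; the proofs are below) =====
def Claim_equal_findFirstUTF8 : Prop := ∀ (data : List Int) (pos : Int), Dom_findFirstUTF8 data pos → Pre_findFirstUTF8 data pos → Spec_findFirstUTF8 data pos (findFirstUTF8 data pos)

-- ===== LEMMAS AND PROOFS =====

-- n &&& m only sees n's low 8 bits when m < 256.
lemma pv_land_mod256 (n m : Nat) (hm : m < 256) : n &&& m = (n % 256) &&& m := by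
  apply Nat.eq_of_testBit_eq
  intro i
  by_cases hi : i < 8
  · rw [Nat.testBit_land, Nat.testBit_land, show (256 : Nat) = 2 ^ 8 from rfl,
      Nat.testBit_mod_two_pow]
    simp [hi]
  · have h28 : (256 : Nat) ≤ 2 ^ i := by
      calc (256 : Nat) = 2 ^ 8 := rfl
        _ ≤ 2 ^ i := Nat.pow_le_pow_right (by norm_num) (by omega)
    simp [Nat.testBit_eq_false_of_lt (lt_of_lt_of_le hm h28)]

-- the complement identity m - (m & y) = (255 - y) & m within 8 bits, at each mask the ports use
set_option maxRecDepth 100000 in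
lemma pv_sub_80 : ∀ y : Nat, y < 256 → 0x80 - (0x80 &&& y) = (255 - y) &&& 0x80 := by decide
set_option maxRecDepth 100000 in
lemma pv_sub_C0 : ∀ y : Nat, y < 256 → 0xC0 - (0xC0 &&& y) = (255 - y) &&& 0xC0 := by decide
set_option maxRecDepth 100000 in
lemma pv_sub_E0 : ∀ y : Nat, y < 256 → 0xE0 - (0xE0 &&& y) = (255 - y) &&& 0xE0 := by decide
set_option maxRecDepth 100000 in
lemma pv_sub_F0 : ∀ y : Nat, y < 256 → 0xF0 - (0xF0 &&& y) = (255 - y) &&& 0xF0 := by decide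
set_option maxRecDepth 100000 in
lemma pv_sub_F8 : ∀ y : Nat, y < 256 → 0xF8 - (0xF8 &&& y) = (255 - y) &&& 0xF8 := by decide

-- Python's b & m for a mask m < 256 depends only on b mod 256 (two's complement low byte);
-- hsub is the per-mask complement identity, discharged by 'decide' at each of the five masks used.
lemma pv_band_mod256 (m : Nat) (hm : m < 256)
    (hsub : ∀ y : Nat, y < 256 → m - (m &&& y) = (255 - y) &&& m) (b : Int) :
    PySem.Int.band b (m : Int) = (((PySem.Int.mod b 256).toNat &&& m : Nat) : Int) := by
  rw [PySem.Int.mod_eq_emod_of_pos (by norm_num)]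
  unfold PySem.Int.band
  have h0m : (0 : Int) ≤ (m : Int) := by positivity
  by_cases hb : 0 ≤ b
  · simp only [hb, h0m, if_true, Int.toNat_natCast]
    have hbn : (b % 256).toNat = b.toNat % 256 := by omega
    rw [hbn]
    exact_mod_cast congrArg (Nat.cast (R := Int)) (pv_land_mod256 b.toNat m hm)
  · simp only [hb, h0m, if_true, if_false, Int.toNat_natCast]
    set nb := (-b - 1).toNat with hnb
    have hb256 : (b % 256).toNat = 255 - nb % 256 := by omega
    rw [hb256]
    congr 1
    calc m - (m &&& nb) = m - (m &&& (nb % 256)) := by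
          rw [Nat.land_comm m nb, pv_land_mod256 nb m hm, Nat.land_comm]
      _ = (255 - nb % 256) &&& m := hsub (nb % 256) (Nat.mod_lt _ (by norm_num))

set_option maxRecDepth 1000000 in
-- lead-byte classification: the table entry at c is exactly what A's mask chain produces
-- (with A's 0 sentinel mapped to the table's -1), on all 256 byte values.
lemma pv_table : ∀ c : Nat, c < 256 →
    PySem.List.pyGet? pvUtf8Table (c : Int) =
      some (let lenA : Int :=
              if (((c &&& 0x80 : Nat) : Int)) = 0 then 1
              else if (((c &&& 0xE0 : Nat) : Int)) = 0xC0 then 2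
              else if (((c &&& 0xF0 : Nat) : Int)) = 0xE0 then 3
              else if (((c &&& 0xF8 : Nat) : Int)) = 0xF0 then 4
              else 0
            if lenA = 0 then -1 else lenA) := by decide

set_option maxRecDepth 100000 in
-- continuation test: A's mask equality versus B's floor-division class, on all 256 byte values.
lemma pv_cont_key : ∀ c : Nat, c < 256 →
    ((((c &&& 0xC0 : Nat) : Int)) = 0x80 ↔ PySem.Int.floordiv (c : Int) 64 = 2) := by decide

-- each byte value b: A's masked test agrees with B's floor-division test
lemma pv_cont_byte (b : Int) :
    (PySem.Int.band b 0xC0 = 0x80) ↔ (PySem.Int.floordiv (PySem.Int.mod b 256) 64 = 2) := by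
  obtain ⟨c, hclt, hceq⟩ : ∃ c : Nat, c < 256 ∧ PySem.Int.mod b 256 = (c : Int) := by
    refine ⟨(PySem.Int.mod b 256).toNat, ?_, (Int.toNat_of_nonneg (PySem.Int.mod_nonneg b (by norm_num))).symm⟩
    have := PySem.Int.mod_lt b (b := 256) (by norm_num)
    omega
  have h256 := pv_band_mod256 0xC0 (by norm_num) pv_sub_C0 b
  simp only [Nat.cast_ofNat, hceq, Int.toNat_natCast] at h256
  rw [h256, hceq]
  exact pv_cont_key c hclt

-- one step of either continuation check, matched up
lemma pv_step (data : List Int) (k : Int) (x y : Int) (hxy : x = y) :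
    (match PySem.List.pyGet? data k with
     | none => (0 : Int)
     | some bi => if PySem.Int.band bi 0xC0 ≠ 0x80 then -1 else x) =
    (match PySem.List.pyGet? data k with
     | none => (0 : Int)
     | some bi => if PySem.Int.floordiv (PySem.Int.mod bi 256) 64 ≠ 2 then -1 else y) := by
  cases h : PySem.List.pyGet? data k with
  | none => rfl
  | some bi =>
    dsimp only
    by_cases hb : PySem.Int.band bi 0xC0 = 0x80
    · rw [if_neg (not_not_intro hb), if_neg (not_not_intro ((pv_cont_byte bi).mp hb)), hxy]
    · rw [if_pos hb, if_pos (fun h2 => hb ((pv_cont_byte bi).mpr h2))]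

-- A's range-driven loop equals B's count-down recursion, at each of the four lengths
lemma pv_loop (data : List Int) (pos : Int) (L : Int)
    (hL : L = 1 ∨ L = 2 ∨ L = 3 ∨ L = 4) :
    pvContA data pos L (PySem.List.pyRange 1 L 1) =
      pvUtf8Tail data (pos + 1) (L - 1).toNat L := by
  have e2 : pos + 1 + 1 = pos + 2 := by ring
  have e3 : pos + 1 + 1 + 1 = pos + 3 := by ring
  rcases hL with h | h | h | h <;> subst h
  · rfl
  · show (match PySem.List.pyGet? data (pos + 1) with
      | none => (0 : Int)
      | some bi => if PySem.Int.band bi 0xC0 ≠ 0x80 then -1 else pvContA data pos 2 []) = _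
    rw [show pvUtf8Tail data (pos + 1) ((2:Int) - 1).toNat 2 =
      (match PySem.List.pyGet? data (pos + 1) with
       | none => (0 : Int)
       | some b => if PySem.Int.floordiv (PySem.Int.mod b 256) 64 ≠ 2 then -1
                   else pvUtf8Tail data (pos + 1 + 1) 0 2) from rfl]
    exact pv_step data (pos + 1) _ _ rfl
  · show (match PySem.List.pyGet? data (pos + 1) with
      | none => (0 : Int)
      | some bi => if PySem.Int.band bi 0xC0 ≠ 0x80 then -1
                   else pvContA data pos 3 [2]) = _
    rw [show pvUtf8Tail data (pos + 1) ((3:Int) - 1).toNat 3 =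
      (match PySem.List.pyGet? data (pos + 1) with
       | none => (0 : Int)
       | some b => if PySem.Int.floordiv (PySem.Int.mod b 256) 64 ≠ 2 then -1
                   else pvUtf8Tail data (pos + 1 + 1) 1 3) from rfl]
    refine pv_step data (pos + 1) _ _ ?_
    show (match PySem.List.pyGet? data (pos + 2) with
      | none => (0 : Int)
      | some bi => if PySem.Int.band bi 0xC0 ≠ 0x80 then -1 else pvContA data pos 3 []) = _
    rw [show pvUtf8Tail data (pos + 1 + 1) 1 3 =
      (match PySem.List.pyGet? data (pos + 1 + 1) with
       | none => (0 : Int)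
       | some b => if PySem.Int.floordiv (PySem.Int.mod b 256) 64 ≠ 2 then -1
                   else pvUtf8Tail data (pos + 1 + 1 + 1) 0 3) from rfl, e2]
    exact pv_step data (pos + 2) _ _ rfl
  · show (match PySem.List.pyGet? data (pos + 1) with
      | none => (0 : Int)
      | some bi => if PySem.Int.band bi 0xC0 ≠ 0x80 then -1
                   else pvContA data pos 4 [2, 3]) = _
    rw [show pvUtf8Tail data (pos + 1) ((4:Int) - 1).toNat 4 =
      (match PySem.List.pyGet? data (pos + 1) with
       | none => (0 : Int)
       | some b => if PySem.Int.floordiv (PySem.Int.mod b 256) 64 ≠ 2 then -1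
                   else pvUtf8Tail data (pos + 1 + 1) 2 4) from rfl]
    refine pv_step data (pos + 1) _ _ ?_
    show (match PySem.List.pyGet? data (pos + 2) with
      | none => (0 : Int)
      | some bi => if PySem.Int.band bi 0xC0 ≠ 0x80 then -1
                   else pvContA data pos 4 [3]) = _
    rw [show pvUtf8Tail data (pos + 1 + 1) 2 4 =
      (match PySem.List.pyGet? data (pos + 1 + 1) with
       | none => (0 : Int)
       | some b => if PySem.Int.floordiv (PySem.Int.mod b 256) 64 ≠ 2 then -1
                   else pvUtf8Tail data (pos + 1 + 1 + 1) 1 4) from rfl, e2]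
    refine pv_step data (pos + 2) _ _ ?_
    show (match PySem.List.pyGet? data (pos + 3) with
      | none => (0 : Int)
      | some bi => if PySem.Int.band bi 0xC0 ≠ 0x80 then -1 else pvContA data pos 4 []) = _
    rw [show pvUtf8Tail data (pos + 2 + 1) 1 4 =
      (match PySem.List.pyGet? data (pos + 2 + 1) with
       | none => (0 : Int)
       | some b => if PySem.Int.floordiv (PySem.Int.mod b 256) 64 ≠ 2 then -1
                   else pvUtf8Tail data (pos + 2 + 1 + 1) 0 4) from rfl,
      show pos + 2 + 1 = pos + 3 from by ring]
    exact pv_step data (pos + 3) _ _ rfl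

-- ===== VERDICT (by name: the statement is the Claim_ definition above) =====
theorem findFirstUTF8_spec : Claim_equal_findFirstUTF8 := by
  intro data pos _ _
  unfold Spec_findFirstUTF8 findFirstUTF8 findFirstUTF8_alt
  cases h : PySem.List.pyGet? data pos with
  | none => rfl
  | some b =>
    dsimp only
    obtain ⟨c, hclt, hceq⟩ : ∃ c : Nat, c < 256 ∧ PySem.Int.mod b 256 = (c : Int) := by
      refine ⟨(PySem.Int.mod b 256).toNat, ?_, (Int.toNat_of_nonneg (PySem.Int.mod_nonneg b (by norm_num))).symm⟩
      have := PySem.Int.mod_lt b (b := 256) (by norm_num)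
      omega
    have h80 := pv_band_mod256 0x80 (by norm_num) pv_sub_80 b
    have hE0 := pv_band_mod256 0xE0 (by norm_num) pv_sub_E0 b
    have hF0 := pv_band_mod256 0xF0 (by norm_num) pv_sub_F0 b
    have hF8 := pv_band_mod256 0xF8 (by norm_num) pv_sub_F8 b
    simp only [Nat.cast_ofNat, hceq, Int.toNat_natCast] at h80 hE0 hF0 hF8
    rw [h80, hE0, hF0, hF8, hceq, pv_table c hclt]
    dsimp only
    set lenA : Int :=
      (if (((c &&& 0x80 : Nat) : Int)) = 0 then 1
       else if (((c &&& 0xE0 : Nat) : Int)) = 0xC0 then 2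
       else if (((c &&& 0xF0 : Nat) : Int)) = 0xE0 then 3
       else if (((c &&& 0xF8 : Nat) : Int)) = 0xF0 then 4
       else 0) with hlenA
    have hmem : lenA = 0 ∨ lenA = 1 ∨ lenA = 2 ∨ lenA = 3 ∨ lenA = 4 := by
      rw [hlenA]; split_ifs <;> simp
    by_cases hz : lenA = 0
    · rw [if_pos hz, if_pos (by rw [if_pos hz]; norm_num)]
    · have hmem' : lenA = 1 ∨ lenA = 2 ∨ lenA = 3 ∨ lenA = 4 := by
        rcases hmem with h | h | h | h | h
        exacts [absurd h hz, Or.inl h, Or.inr (Or.inl h), Or.inr (Or.inr (Or.inl h)),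
          Or.inr (Or.inr (Or.inr h))]
      rw [if_neg hz,
        if_neg (show ¬ (if lenA = 0 then (-1 : Int) else lenA) < 0 by
          rw [if_neg hz]; rcases hmem' with h | h | h | h <;> rw [h] <;> norm_num),
        if_neg hz]
      exact pv_loop data pos lenA hmem'
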